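-- pv_equiv track=rewrite | github.com/ecw74/advent-of-code | 2023/day-02/part-2.py | find_minimum_elements
-- ===== SOURCE A (Python) =====
-- from typing import Dict, List
--
-- def find_minimum_elements(games: List[Dict[str, List[Dict[str, int]]]]) -> Dict[str, Dict[str, int]]:
--     """
--     Iterates over a list of games and finds the minimum number of red, green, and blue elements required for each game.
--     The minimum number is defined as the maximum number of each color required at any stage of the game.
--
--     :param games: List of dictionaries containing game IDs and lists of color counts.
--     :return: Dictionary with game IDs and the minimum number of red, green, and blue elements required.
--
--     >>> games_example = [
--     ...  {'1': [{'red': 4, 'green': 0, 'blue': 4}, {'red': 1, 'green': 2, 'blue': 6}, {'red': 0, 'green': 2, 'blue': 0}]},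
--     ...  {'2': [{'red': 0, 'green': 2, 'blue': 1}, {'red': 1, 'green': 3, 'blue': 4}, {'red': 0, 'green': 1, 'blue': 1}]},
--     ...  {'3': [{'red': 20, 'green': 8, 'blue': 6}, {'red': 4, 'green': 13, 'blue': 5}, {'red': 1, 'green': 5, 'blue': 0}]},
--     ...  {'4': [{'red': 3, 'green': 1, 'blue': 6}, {'red': 6, 'green': 3, 'blue': 0}, {'red': 14, 'green': 3, 'blue': 15}]},
--     ...  {'5': [{'red': 6, 'green': 3, 'blue': 1}, {'red': 1, 'green': 2, 'blue': 2}]}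
--     ... ]
--     >>> find_minimum_elements(games_example)
--     {'1': {'red': 4, 'green': 2, 'blue': 6}, '2': {'red': 1, 'green': 3, 'blue': 4}, '3': {'red': 20, 'green': 13, 'blue': 6}, '4': {'red': 14, 'green': 3, 'blue': 15}, '5': {'red': 6, 'green': 3, 'blue': 2}}
--     """
--     min_elements = {}
--
--     for game in games:
--         for game_id, color_counts in game.items():
--             # Initialize minimum values for each color
--             min_red = min_green = min_blue = 0
--
--             # Find the maximum required for each color in all stages
--             for stage in color_counts:
--                 min_red = max(min_red, stage['red'])
--                 min_green = max(min_green, stage['green'])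
--                 min_blue = max(min_blue, stage['blue'])
--
--             # Update the dictionary with the minimum required for each color
--             min_elements[game_id] = {'red': min_red, 'green': min_green, 'blue': min_blue}
--
--     return min_elements
-- ===== SOURCE B (Python) =====
-- from typing import Dict, List
--
--
-- def find_minimum_elements(games: List[Dict[str, List[Dict[str, int]]]]) -> Dict[str, Dict[str, int]]:
--     def needed(color, stages):
--         # sort the observed counts (with a 0 floor) descending; the first entry is the requirement
--         return sorted([0] + [stage[color] for stage in stages], reverse=True)[0]
--
--     return {
--         game_id: {color: needed(color, stages) for color in ('red', 'green', 'blue')}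
--         for game in games
--         for game_id, stages in game.items()
--     }
-- ===== Notes on version B (the rewrite author's own statement) =====
-- stated objective: alternative
-- what changed: B replaces A's single pass threading three running-max accumulators through each game's stages with a sort-based reduction: per color it collects the stage counts (plus a 0 floor), sorts them descending and takes the first element, assembling the result by dict comprehension.
import Mathlib
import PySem

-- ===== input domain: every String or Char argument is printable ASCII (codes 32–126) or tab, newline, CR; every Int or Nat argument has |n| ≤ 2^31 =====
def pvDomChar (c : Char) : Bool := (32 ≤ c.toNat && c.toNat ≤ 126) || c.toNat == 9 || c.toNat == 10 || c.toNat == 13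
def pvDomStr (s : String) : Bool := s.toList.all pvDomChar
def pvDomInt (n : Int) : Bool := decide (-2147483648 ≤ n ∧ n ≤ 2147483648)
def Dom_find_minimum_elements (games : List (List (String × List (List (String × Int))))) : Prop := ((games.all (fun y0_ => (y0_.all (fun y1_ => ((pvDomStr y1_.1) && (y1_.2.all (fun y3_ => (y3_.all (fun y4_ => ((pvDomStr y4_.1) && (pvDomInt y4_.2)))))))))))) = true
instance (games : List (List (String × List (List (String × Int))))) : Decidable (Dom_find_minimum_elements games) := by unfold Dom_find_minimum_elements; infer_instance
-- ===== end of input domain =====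

-- B replaces A's single running-max pass over each game's stages by a sort-based
-- reduction: per color it sorts the counts (with a 0 floor) descending and takes the
-- first element; objective: alternative algorithm, same results.

-- ===== PORT A =====
-- stage['red'] raises KeyError when absent; Pre_ restricts to stages carrying all
-- three colors, so getD's default is never consulted on admitted inputs.
def find_minimum_elements (games : List (List (String × List (List (String × Int))))) : List (String × List (String × Int)) :=
  (games.foldl (fun (min_elements : PySem.Dict String (List (String × Int))) game =>
    game.foldl (fun min_elements p =>
      let t := p.2.foldl (fun (s : Int × Int × Int) stage =>
        (max s.1 (PySem.Dict.getD ⟨stage⟩ "red" 0),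
         max s.2.1 (PySem.Dict.getD ⟨stage⟩ "green" 0),
         max s.2.2 (PySem.Dict.getD ⟨stage⟩ "blue" 0))) (0, 0, 0)
      min_elements.insert p.1 [("red", t.1), ("green", t.2.1), ("blue", t.2.2)])
      min_elements) PySem.Dict.empty).items

-- ===== PORT B =====
-- sorted([0] + [stage[color] for stage in stages], reverse=True)[0]; the sorted list
-- is never empty (the 0 floor), so the [0]-indexing default is never consulted.
def pvNeeded (color : String) (stages : List (List (String × Int))) : Int :=
  (PySem.List.pyGet?
    (PySem.List.sorted (0 :: stages.map (fun stage => PySem.Dict.getD ⟨stage⟩ color 0))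
      (fun x => x) true) 0).getD 0

-- the dict comprehension, built key by key in comprehension order
def find_minimum_elements_alt (games : List (List (String × List (List (String × Int))))) : List (String × List (String × Int)) :=
  (games.foldl (fun (d : PySem.Dict String (List (String × Int))) game =>
    game.foldl (fun d p =>
      d.insert p.1 (["red", "green", "blue"].map (fun c => (c, pvNeeded c p.2))))
      d) PySem.Dict.empty).items

-- ===== PRECONDITION & SPEC =====
-- Pre_ excludes exactly the inputs where the Pythons raise KeyError: a stage dict
-- missing one of 'red'/'green'/'blue'.
def Pre_find_minimum_elements (games : List (List (String × List (List (String × Int))))) : Prop :=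
  ∀ game ∈ games, ∀ p ∈ game, ∀ stage ∈ p.2,
    ((PySem.Dict.get? ⟨stage⟩ "red").isSome ∧ (PySem.Dict.get? ⟨stage⟩ "green").isSome ∧
     (PySem.Dict.get? ⟨stage⟩ "blue").isSome : Prop)
instance (games : List (List (String × List (List (String × Int))))) : Decidable (Pre_find_minimum_elements games) := by unfold Pre_find_minimum_elements; infer_instance

def pvWitness_find_minimum_elements : (List (List (String × List (List (String × Int))))) :=
  [[("1", [[("red", 4), ("green", 0), ("blue", 4)], [("red", 1), ("green", 2), ("blue", 6)]])],
   [("2", [[("red", 0), ("green", 2), ("blue", 1)]])]]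

def Spec_find_minimum_elements (games : List (List (String × List (List (String × Int))))) (out : List (String × List (String × Int))) : Prop := out = find_minimum_elements_alt games
instance (games : List (List (String × List (List (String × Int))))) (out : List (String × List (String × Int))) : Decidable (Spec_find_minimum_elements games out) := by unfold Spec_find_minimum_elements; infer_instance

-- ===== CLAIM (what is proved, stated in full; the proofs are below) =====
def Claim_equal_find_minimum_elements : Prop := ∀ (games : List (List (String × List (List (String × Int))))), Dom_find_minimum_elements games → Pre_find_minimum_elements games → Spec_find_minimum_elements games (find_minimum_elements games)

-- ===== LEMMAS AND PROOFS =====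

-- the running max of a list is one of its elements (or the seed)
theorem pv_foldl_max_mem (l : List Int) (a : Int) : l.foldl max a ∈ a :: l := by
  induction l generalizing a with
  | nil => simp
  | cons h t ih =>
    rw [List.foldl_cons]
    rcases List.mem_cons.mp (ih (max a h)) with h1 | h1
    · rw [h1]; rcases max_choice a h with h2 | h2 <;> simp [h2]
    · simp [List.mem_cons.mpr (Or.inr h1)]

-- the running max dominates the seed and every element
theorem pv_le_foldl_max (l : List Int) (a : Int) : ∀ y ∈ a :: l, y ≤ l.foldl max a := by
  induction l generalizing a with
  | nil => intro y hy; simp at hy; simp [List.foldl_nil, hy]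
  | cons h t ih =>
    intro y hy
    rw [List.foldl_cons]
    have hb : ∀ z ∈ (max a h) :: t, z ≤ t.foldl max (max a h) := ih (max a h)
    have ha : a ≤ t.foldl max (max a h) := le_trans (le_max_left a h) (hb _ (by simp))
    have hh : h ≤ t.foldl max (max a h) := le_trans (le_max_right a h) (hb _ (by simp))
    rcases List.mem_cons.mp hy with h1 | h1
    · exact h1 ▸ ha
    · rcases List.mem_cons.mp h1 with h2 | h2
      · exact h2 ▸ hh
      · exact hb _ (List.mem_cons.mpr (Or.inr h2))

-- head of the descending sort of (0 :: l) = the running max of l from 0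
theorem pv_sorted_head (l : List Int) :
    (PySem.List.pyGet? (PySem.List.sorted (0 :: l) (fun x => x) true) 0).getD 0
      = l.foldl max 0 := by
  rcases hs : PySem.List.sorted (0 :: l) (fun x => x) true with _ | ⟨m, t⟩
  · exact absurd ((PySem.List.sorted_eq_nil_iff _ _ _).mp hs) (by simp)
  · have hmax : ∀ y ∈ (0 : Int) :: l, y ≤ m :=
      PySem.List.key_head_sorted_rev_ge _ _ hs
    have hm : m ∈ (0 : Int) :: l := by
      have hmem : m ∈ PySem.List.sorted ((0 : Int) :: l) (fun x => x) true := by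
        rw [hs]; simp
      exact ((PySem.List.sorted_perm _ _ _).mem_iff).mp hmem
    have h1 : m ≤ l.foldl max 0 := pv_le_foldl_max l 0 m hm
    have h2 : l.foldl max 0 ≤ m := hmax _ (pv_foldl_max_mem l 0)
    simp [PySem.List.pyGet?, PySem.List.pyIdx?, le_antisymm h1 h2]

-- B's per-color requirement = the corresponding running max
theorem pv_needed_eq (c : String) (stages : List (List (String × Int))) :
    pvNeeded c stages
      = stages.foldl (fun m stage => max m (PySem.Dict.getD ⟨stage⟩ c 0)) 0 := by
  unfold pvNeeded
  rw [pv_sorted_head, List.foldl_map]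

-- A's combined three-accumulator fold splits into three independent max-folds
theorem pv_tri (stages : List (List (String × Int))) (a b c : Int) :
    stages.foldl (fun (s : Int × Int × Int) stage =>
        (max s.1 (PySem.Dict.getD ⟨stage⟩ "red" 0),
         max s.2.1 (PySem.Dict.getD ⟨stage⟩ "green" 0),
         max s.2.2 (PySem.Dict.getD ⟨stage⟩ "blue" 0))) (a, b, c)
      = (stages.foldl (fun m stage => max m (PySem.Dict.getD ⟨stage⟩ "red" 0)) a,
         stages.foldl (fun m stage => max m (PySem.Dict.getD ⟨stage⟩ "green" 0)) b,
         stages.foldl (fun m stage => max m (PySem.Dict.getD ⟨stage⟩ "blue" 0)) c) := by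
  induction stages generalizing a b c with
  | nil => rfl
  | cons h t ih => simp [List.foldl_cons, ih]

theorem pv_inner (p : String × List (List (String × Int))) :
    (let t := p.2.foldl (fun (s : Int × Int × Int) stage =>
        (max s.1 (PySem.Dict.getD ⟨stage⟩ "red" 0),
         max s.2.1 (PySem.Dict.getD ⟨stage⟩ "green" 0),
         max s.2.2 (PySem.Dict.getD ⟨stage⟩ "blue" 0))) (0, 0, 0)
     [("red", t.1), ("green", t.2.1), ("blue", t.2.2)])
      = ["red", "green", "blue"].map (fun c => (c, pvNeeded c p.2)) := by
  simp [pv_tri, pv_needed_eq]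

-- ===== VERDICT (by name: the statement is the Claim_ definition above) =====
theorem find_minimum_elements_spec : Claim_equal_find_minimum_elements := by
  intro games _ _
  show find_minimum_elements games = find_minimum_elements_alt games
  unfold find_minimum_elements find_minimum_elements_alt
  have h : (fun (min_elements : PySem.Dict String (List (String × Int))) (p : String × List (List (String × Int))) =>
      let t := p.2.foldl (fun (s : Int × Int × Int) stage =>
        (max s.1 (PySem.Dict.getD ⟨stage⟩ "red" 0),
         max s.2.1 (PySem.Dict.getD ⟨stage⟩ "green" 0),
         max s.2.2 (PySem.Dict.getD ⟨stage⟩ "blue" 0))) (0, 0, 0)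
      min_elements.insert p.1 [("red", t.1), ("green", t.2.1), ("blue", t.2.2)])
      = (fun (d : PySem.Dict String (List (String × Int))) p =>
          d.insert p.1 (["red", "green", "blue"].map (fun c => (c, pvNeeded c p.2)))) := by
    funext d p
    exact congrArg (d.insert p.1) (pv_inner p)
  rw [h]
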